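-- pv_equiv track=rewrite | github.com/9keyyyy/leetcode | 0386-lexicographical-numbers/0386-lexicographical-numbers.py | lexicalOrder
-- ===== SOURCE A (Python) =====
-- def lexicalOrder(n):
--     """
--     :type n: int
--     :rtype: List[int]
--     """
--     result = []
--     current = 1
--
--     for _ in range(n):
--         result.append(current)
--
--         if current * 10 <= n:
--             current *= 10
--         else:
--             while current % 10 == 9 or current + 1 > n:
--                 current //= 10
--             current += 1
--
--     return result
-- ===== SOURCE B (Python) =====
-- def lexicalOrder(n):
--     result = []
--
--     def dfs(cur):
--         if cur > n:
--             return
--         result.append(cur)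
--         for d in range(10):
--             dfs(cur * 10 + d)
--
--     for i in range(1, 10):
--         dfs(i)
--     return result
-- ===== Notes on version B (the rewrite author's own statement) =====
-- stated objective: alternative
-- what changed: Replaces the iterative successor computation (carry/while loop that finds the next number in lexicographic order) by a recursive pre-order DFS over the decimal-prefix tree rooted at digits 1..9.
import Mathlib
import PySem

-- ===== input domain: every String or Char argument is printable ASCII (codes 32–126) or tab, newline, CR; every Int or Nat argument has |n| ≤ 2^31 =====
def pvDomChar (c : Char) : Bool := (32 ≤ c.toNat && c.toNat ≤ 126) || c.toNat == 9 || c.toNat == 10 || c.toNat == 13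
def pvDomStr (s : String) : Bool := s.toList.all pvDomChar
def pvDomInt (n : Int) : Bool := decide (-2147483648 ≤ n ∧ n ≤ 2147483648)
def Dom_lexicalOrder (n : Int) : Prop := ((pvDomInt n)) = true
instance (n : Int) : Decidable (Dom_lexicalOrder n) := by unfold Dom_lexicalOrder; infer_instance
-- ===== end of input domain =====

-- B replaces A's iterative successor computation (carry/while loop) by a recursive
-- pre-order DFS over the decimal-prefix tree; an alternative algorithm, same output.

-- ===== PORT A =====
-- the inner `while current % 10 == 9 or current + 1 > n: current //= 10` loop;
-- the fuel argument (64) only makes it total in Lean: the loop strictly shortens the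
-- decimal representation of `current`, which within Dom has at most 11 digits
def whileA (n : Int) : Nat → Int → Int
  | 0, c => c
  | f+1, c =>
      if PySem.Int.mod c 10 = 9 ∨ c + 1 > n then whileA n f (PySem.Int.floordiv c 10) else c

def lexicalOrder (n : Int) : List Int :=
  ((PySem.List.pyRange 0 n 1).foldl
    (fun (st : List Int × Int) _ =>
      let result := st.1 ++ [st.2]
      if st.2 * 10 ≤ n then (result, st.2 * 10)
      else (result, whileA n 64 st.2 + 1))
    ([], 1)).1

-- ===== PORT B =====
-- `dfs(cur)`: return if cur > n, emit cur, recurse on cur*10+d for d in range(10);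
-- the fuel argument (64) only makes the recursion total in Lean (depth ≤ 11 within Dom)
def dfsB (n : Int) : Nat → Int → List Int
  | 0, _ => []
  | f+1, cur =>
      if cur > n then []
      else cur :: (List.range 10).flatMap (fun d : Nat => dfsB n f (cur * 10 + (d : Int)))

-- `for i in range(1, 10): dfs(i)` appending into one shared result list
def lexicalOrder_alt (n : Int) : List Int :=
  (PySem.List.pyRange 1 10 1).flatMap (fun i => dfsB n 64 i)

-- ===== PRECONDITION & SPEC =====
def Spec_lexicalOrder (n : Int) (out : List Int) : Prop := out = lexicalOrder_alt n
instance (n : Int) (out : List Int) : Decidable (Spec_lexicalOrder n out) := by unfold Spec_lexicalOrder; infer_instance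

-- ===== CLAIM (what is proved, stated in full; the proofs are below) =====
def Claim_equal_lexicalOrder : Prop := ∀ (n : Int), Dom_lexicalOrder n → Spec_lexicalOrder n (lexicalOrder n)

-- ===== LEMMAS AND PROOFS =====

lemma whileA_succ (n : Int) (f : Nat) (c : Int) : whileA n (f+1) c =
    if PySem.Int.mod c 10 = 9 ∨ c + 1 > n then whileA n f (PySem.Int.floordiv c 10) else c := rfl

lemma wStab (n : Int) : ∀ (f : Nat) (c : Int), 0 ≤ c → 1 ≤ n → c < 10 ^ f →
    whileA n (f+1) c = whileA n f c := by
  intro f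
  induction f with
  | zero =>
    intro c h0 h1 hf
    have hc : c = 0 := by omega
    subst hc
    have hcond : ¬ (PySem.Int.mod (0:Int) 10 = 9 ∨ (0:Int) + 1 > n) := by
      intro h
      rcases h with h | h
      · rw [show PySem.Int.mod (0:Int) 10 = 0 from rfl] at h; omega
      · omega
    rw [whileA_succ, if_neg hcond]
    rfl
  | succ f ih =>
    intro c h0 h1 hf
    show whileA n (f+2) c = whileA n (f+1) c
    by_cases hcond : PySem.Int.mod c 10 = 9 ∨ c + 1 > n
    · have e1 : whileA n (f+2) c = whileA n (f+1) (PySem.Int.floordiv c 10) := by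
        rw [show f+2 = (f+1)+1 from rfl, whileA_succ, if_pos hcond]
      have e2 : whileA n (f+1) c = whileA n f (PySem.Int.floordiv c 10) := by
        rw [whileA_succ, if_pos hcond]
      rw [e1, e2]
      have hfd : PySem.Int.floordiv c 10 = c / 10 :=
        PySem.Int.floordiv_eq_ediv_of_pos (by norm_num)
      apply ih
      · rw [hfd]; exact Int.ediv_nonneg h0 (by norm_num)
      · exact h1
      · rw [hfd, Int.ediv_lt_iff_lt_mul (by norm_num)]
        calc c < 10 ^ (f+1) := hf
        _ = 10 ^ f * 10 := by ring
    · have e1 : whileA n (f+2) c = c := by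
        rw [show f+2 = (f+1)+1 from rfl, whileA_succ, if_neg hcond]
      have e2 : whileA n (f+1) c = c := by
        rw [whileA_succ, if_neg hcond]
      rw [e1, e2]

lemma flatMap_range_trim {α : Type} (K k : Nat) (g : Nat → List α) (hk : k ≤ K)
    (h : ∀ d, k ≤ d → d < K → g d = []) :
    (List.range K).flatMap g = (List.range k).flatMap g := by
  have hK : K = k + (K - k) := by omega
  rw [hK, List.range_add, List.flatMap_append]
  have : ((List.range (K - k)).map (fun x => k + x)).flatMap g = [] := by
    rw [List.flatMap_eq_nil_iff]
    intro x hx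
    simp only [List.mem_map, List.mem_range] at hx
    obtain ⟨j, hj, rfl⟩ := hx
    exact h _ (by omega) (by omega)
  rw [this, List.append_nil]

lemma lead_digit : ∀ m : Int, 1 ≤ m → ∃ (c : Int) (j : Nat),
    1 ≤ c ∧ c ≤ 9 ∧ c * 10 ^ j ≤ m ∧ m < (c+1) * 10 ^ j := by
  have H : ∀ (N : Nat) (m : Int), 1 ≤ m → m.toNat ≤ N → ∃ (c : Int) (j : Nat),
      1 ≤ c ∧ c ≤ 9 ∧ c * 10 ^ j ≤ m ∧ m < (c+1) * 10 ^ j := by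
    intro N
    induction N with
    | zero => intro m h1 h2; omega
    | succ N ih =>
      intro m h1 h2
      by_cases hm : m ≤ 9
      · exact ⟨m, 0, h1, hm, by simp, by simp⟩
      · push Not at hm
        set q := m / 10 with hq
        have hq1 : 1 ≤ q := by
          rw [hq, Int.le_ediv_iff_mul_le (by norm_num)]; omega
        have hqm : q < m := by
          rw [hq, Int.ediv_lt_iff_lt_mul (by norm_num)]; nlinarith
        obtain ⟨c, j, hc1, hc9, hcl, hcr⟩ := ih q hq1 (by omega)
        refine ⟨c, j+1, hc1, hc9, ?_, ?_⟩
        · have h10 : 10 * q ≤ m := by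
            have := Int.ediv_mul_le m (show (10:Int) ≠ 0 by norm_num)
            linarith [this]
          calc c * 10 ^ (j+1) = (c * 10 ^ j) * 10 := by ring
          _ ≤ q * 10 := by linarith
          _ ≤ m := by linarith
        · have hmod : m % 10 < 10 := Int.emod_lt_of_pos m (by norm_num)
          have hdm : 10 * q + m % 10 = m := Int.mul_ediv_add_emod m 10
          calc m < 10 * (q + 1) := by omega
          _ ≤ 10 * ((c+1) * 10 ^ j) := by linarith
          _ = (c+1) * 10 ^ (j+1) := by ring
  intro m h1; exact H m.toNat m h1 le_rfl

lemma dfsB_nil (n : Int) (f : Nat) (c : Int) (h : n < c) : dfsB n f c = [] := by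
  cases f <;> simp [dfsB, h]

lemma pref_disjoint (a b m : Int) (j i : Nat) (ha : 1 ≤ a) (hab : a < b) (hb : b < 10 * a)
    (h1 : a * 10 ^ j ≤ m) (h2 : m < (a+1) * 10 ^ j)
    (h3 : b * 10 ^ i ≤ m) (h4 : m < (b+1) * 10 ^ i) : False := by
  have pj : (0:Int) < 10 ^ j := by positivity
  have pi : (0:Int) < 10 ^ i := by positivity
  rcases lt_trichotomy j i with h | h | h
  · -- j < i : m ≥ b·10^i ≥ 10b·10^j ≥ (a+1)·10^j > m
    have e : (10:Int) ^ i = 10 ^ j * 10 ^ (i - j) := by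
      rw [← pow_add]; congr 1; omega
    have h10 : (10:Int) ≤ 10 ^ (i - j) := by
      calc (10:Int) = 10 ^ 1 := by ring
      _ ≤ 10 ^ (i - j) := by
        apply pow_le_pow_right₀ (by norm_num) (by omega)
    have k1 : a + 1 ≤ b * 10 ^ (i-j) := by nlinarith
    have : m < m := by
      calc m < (a+1) * 10^j := h2
      _ ≤ (b * 10^(i-j)) * 10^j := by nlinarith
      _ = b * 10^i := by rw [e]; ring
      _ ≤ m := h3
    exact absurd this (lt_irrefl m)
  · subst h; nlinarith
  · -- i < j : m ≥ a·10^j ≥ 10a·10^i ≥ (b+1)·10^i > m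
    have e : (10:Int) ^ j = 10 ^ i * 10 ^ (j - i) := by
      rw [← pow_add]; congr 1; omega
    have h10 : (10:Int) ≤ 10 ^ (j - i) := by
      calc (10:Int) = 10 ^ 1 := by ring
      _ ≤ 10 ^ (j - i) := by
        apply pow_le_pow_right₀ (by norm_num) (by omega)
    have k1 : b + 1 ≤ a * 10 ^ (j-i) := by nlinarith
    have : m < m := by
      calc m < (b+1) * 10^i := h4
      _ ≤ (a * 10^(j-i)) * 10^i := by nlinarith
      _ = a * 10^j := by rw [e]; ring
      _ ≤ m := h1
    exact absurd this (lt_irrefl m)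

lemma dfs_mem (n : Int) : ∀ (f : Nat) (c : Int), 1 ≤ c → n < c * 10 ^ f → ∀ m : Int,
    (m ∈ dfsB n f c ↔ ∃ j : Nat, c * 10 ^ j ≤ m ∧ m < (c+1) * 10 ^ j ∧ m ≤ n) := by
  intro f
  induction f with
  | zero =>
    intro c hc hf m
    simp only [dfsB, List.not_mem_nil, false_iff]
    rintro ⟨j, h1, h2, h3⟩
    have : (1:Int) ≤ 10 ^ j := one_le_pow₀ (by norm_num)
    simp only [pow_zero, mul_one] at hf
    nlinarith
  | succ f ih =>
    intro c hc hf m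
    by_cases hcn : c > n
    · rw [dfsB_nil n _ c hcn]
      simp only [List.not_mem_nil, false_iff]
      rintro ⟨j, h1, h2, h3⟩
      have : (1:Int) ≤ 10 ^ j := one_le_pow₀ (by norm_num)
      nlinarith
    · have hfuel : ∀ d : Int, 0 ≤ d → n < (c * 10 + d) * 10 ^ f := by
        intro d hd
        have p : (0:Int) < 10 ^ f := by positivity
        have : c * 10 ^ (f+1) = (c * 10) * 10 ^ f := by ring
        nlinarith
      constructor
      · intro hm
        simp only [dfsB, if_neg hcn, List.mem_cons] at hm
        rcases hm with rfl | hm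
        · exact ⟨0, by simp, by simp, by omega⟩
        · rw [List.mem_flatMap] at hm
          obtain ⟨d, hd, hmd⟩ := hm
          rw [List.mem_range] at hd
          obtain ⟨j, h1, h2, h3⟩ := (ih (c * 10 + d) (by linarith [Int.natCast_nonneg d])
            (hfuel d (by positivity)) m).mp hmd
          refine ⟨j + 1, ?_, ?_, h3⟩
          · have p : (0:Int) < 10 ^ j := by positivity
            calc c * 10 ^ (j+1) = (c * 10) * 10 ^ j := by ring
            _ ≤ (c * 10 + d) * 10 ^ j := by nlinarith [Int.natCast_nonneg d]
            _ ≤ m := h1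
          · have p : (0:Int) < 10 ^ j := by positivity
            have hd9 : (d:Int) ≤ 9 := by exact_mod_cast Nat.le_of_lt_succ hd
            calc m < (c * 10 + d + 1) * 10 ^ j := h2
            _ ≤ (c * 10 + 10) * 10 ^ j := by nlinarith
            _ = (c + 1) * 10 ^ (j+1) := by ring
      · rintro ⟨j, h1, h2, h3⟩
        simp only [dfsB, if_neg hcn, List.mem_cons, List.mem_flatMap, List.mem_range]
        cases j with
        | zero =>
          left
          simp only [pow_zero, mul_one] at h1 h2
          omega
        | succ j =>
          right
          have pj : (0:Int) < 10 ^ j := by positivity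
          set q := m / 10 ^ j with hqdef
          have hq1 : c * 10 ≤ q := by
            rw [hqdef, Int.le_ediv_iff_mul_le pj]
            calc c * 10 * 10 ^ j = c * 10 ^ (j+1) := by ring
            _ ≤ m := h1
          have hq2 : q < c * 10 + 10 := by
            rw [hqdef, Int.ediv_lt_iff_lt_mul pj]
            calc m < (c+1) * 10 ^ (j+1) := h2
            _ = (c * 10 + 10) * 10 ^ j := by ring
          refine ⟨(q - c * 10).toNat, by omega, ?_⟩
          have hcast : c * 10 + ((q - c * 10).toNat : Int) = q := by omega
          rw [hcast]
          apply (ih q (by omega) ?_ m).mpr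
          · refine ⟨j, ?_, ?_, h3⟩
            · rw [hqdef]; exact Int.ediv_mul_le m (by positivity)
            · have hde : 10 ^ j * (m / 10 ^ j) + m % 10 ^ j = m := Int.mul_ediv_add_emod m _
              have hmod : m % 10 ^ j < 10 ^ j := Int.emod_lt_of_pos m pj
              rw [← hqdef] at hde
              nlinarith
          · have : c * 10 * 10 ^ f ≤ q * 10 ^ f := by
              have p : (0:Int) < 10 ^ f := by positivity
              nlinarith
            calc n < c * 10 ^ (f+1) := hf
            _ = c * 10 * 10 ^ f := by ring
            _ ≤ q * 10 ^ f := this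

lemma run_nodup (n : Int) (f : Nat)
    (hnd : ∀ c : Int, 1 ≤ c → n < c * 10 ^ f → (dfsB n f c).Nodup) :
    ∀ (k : Nat) (a : Int), 1 ≤ a → a + k ≤ 10 * a → n < a * 10 ^ f →
    ((List.range k).flatMap (fun i : Nat => dfsB n f (a + (i : Int)))).Nodup := by
  intro k
  induction k with
  | zero => intro a _ _ _; simp
  | succ k ih =>
    intro a ha hk hf
    have pf : (0:Int) < 10 ^ f := by positivity
    have hsplit : List.range (k+1) = List.range 1 ++ (List.range k).map (fun x => 1 + x) := by
      rw [show k+1 = 1+k from by omega, List.range_add]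
    rw [hsplit, List.flatMap_append]
    have hcomp : ((List.range k).map (fun x => 1 + x)).flatMap (fun i : Nat => dfsB n f (a + (i : Int)))
        = (List.range k).flatMap (fun i : Nat => dfsB n f ((a + 1) + (i : Int))) := by
      rw [List.flatMap_map]
      apply List.flatMap_congr
      intro x _
      show dfsB n f (a + ((1 + x : Nat) : Int)) = dfsB n f ((a + 1) + (x : Int))
      congr 1
      push_cast
      ring
    rw [hcomp]
    have hone : (List.range 1).flatMap (fun i : Nat => dfsB n f (a + (i : Int))) = dfsB n f a := by
      simp
    rw [hone]
    apply List.Nodup.append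
    · exact hnd a ha hf
    · exact ih (a+1) (by omega) (by push_cast at hk ⊢; omega) (by nlinarith)
    · intro m hm1 hm2
      rw [List.mem_flatMap] at hm2
      obtain ⟨i, hi, hmi⟩ := hm2
      rw [List.mem_range] at hi
      obtain ⟨j, hj1, hj2, _⟩ := (dfs_mem n f a ha hf m).mp hm1
      have hb1 : (1:Int) ≤ a + 1 + (i:Int) := by linarith [Int.natCast_nonneg i]
      have hbf : n < (a + 1 + (i:Int)) * 10 ^ f := by nlinarith [Int.natCast_nonneg i]
      obtain ⟨jj, hjj1, hjj2, _⟩ := (dfs_mem n f (a + 1 + (i:Int)) hb1 hbf m).mp hmi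
      have hilt : (i:Int) < (k:Int) := by exact_mod_cast hi
      exact pref_disjoint a (a + 1 + (i:Int)) m j jj ha
        (by linarith [Int.natCast_nonneg i])
        (by push_cast at hk; linarith) hj1 hj2 hjj1 hjj2

lemma dfs_nodup (n : Int) : ∀ (f : Nat) (c : Int), 1 ≤ c → n < c * 10 ^ f →
    (dfsB n f c).Nodup := by
  intro f
  induction f with
  | zero => intro c _ _; simp [dfsB]
  | succ f ih =>
    intro c hc hf
    by_cases hcn : n < c
    · rw [dfsB_nil n _ c hcn]; exact List.nodup_nil
    · have e : dfsB n (f+1) c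
          = c :: (List.range 10).flatMap (fun d : Nat => dfsB n f (c * 10 + (d : Int))) := by
        rw [show dfsB n (f+1) c = if c > n then [] else
          c :: (List.range 10).flatMap (fun d : Nat => dfsB n f (c * 10 + (d : Int))) from rfl,
          if_neg (by omega)]
      rw [e, List.nodup_cons]
      refine ⟨?_, ?_⟩
      · intro hmem
        rw [List.mem_flatMap] at hmem
        obtain ⟨d, hd, hmd⟩ := hmem
        have hfuel : n < (c * 10 + (d:Int)) * 10 ^ f := by
          have : c * 10 ^ (f+1) = c * 10 * 10 ^ f := by ring
          nlinarith [Int.natCast_nonneg d, pow_pos (show (0:Int) < 10 by norm_num) f]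
        obtain ⟨j, h1, h2, h3⟩ := (dfs_mem n f (c * 10 + (d:Int))
          (by linarith [Int.natCast_nonneg d]) hfuel c).mp hmd
        have hp : (1:Int) ≤ 10 ^ j := one_le_pow₀ (by norm_num)
        nlinarith [Int.natCast_nonneg d]
      · have := run_nodup n f ih 10 (c * 10) (by linarith) (by push_cast; linarith)
          (by
            have h9 : c * 10 ^ (f+1) = c * 10 * 10 ^ f := by ring
            linarith)
        exact this

def stepA (n c : Int) : Int := if c * 10 ≤ n then c * 10 else whileA n 64 c + 1

lemma foldA (n : Int) : ∀ (l : List Int) (Q acc : List Int) (c : Int),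
    Q.length = l.length → List.IsChain (fun a b => stepA n a = b) Q →
    (Q ≠ [] → Q.head? = some c) →
    (l.foldl (fun (st : List Int × Int) _ =>
      let result := st.1 ++ [st.2]
      if st.2 * 10 ≤ n then (result, st.2 * 10)
      else (result, whileA n 64 st.2 + 1)) (acc, c)).1 = acc ++ Q := by
  intro l
  induction l with
  | nil =>
    intro Q acc c hlen _ _
    have : Q = [] := List.eq_nil_of_length_eq_zero hlen
    subst this; simp
  | cons x l ih =>
    intro Q acc c hlen hchain hhead
    match Q, hlen with
    | q :: Q', hlen =>
      have hq : q = c := by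
        have := hhead (by simp)
        simp at this; omega
      subst hq
      simp only [List.foldl_cons]
      rw [show (if q * 10 ≤ n then (acc ++ [q], q * 10) else (acc ++ [q], whileA n 64 q + 1))
          = (acc ++ [q], stepA n q) from by
        simp only [stepA]; split_ifs <;> rfl]
      rw [List.isChain_cons] at hchain
      have h2 := ih Q' (acc ++ [q]) (stepA n q)
        (by simpa using hlen) hchain.2
        (by intro hne
            cases Q' with
            | nil => exact absurd rfl hne
            | cons y Y =>
              have := hchain.1 y (by simp)
              simp [this])
      have h3 : (acc ++ [q]) ++ Q' = acc ++ q :: Q' := by simp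
      exact h2.trans h3

lemma run_chain (n : Int) (f : Nat)
    (ih : ∀ c : Int, 1 ≤ c → c ≤ n → n < c * 10 ^ f →
      (dfsB n f c).head? = some c ∧
      List.IsChain (fun x y => stepA n x = y) (dfsB n f c) ∧
      ∃ l, (dfsB n f c).getLast? = some l ∧ stepA n l = whileA n 64 c + 1) :
    ∀ (k : Nat) (a : Int), 1 ≤ a → 0 < k → a + k ≤ n + 1 → n < a * 10 ^ f →
    (∀ i : Nat, i + 1 < k → PySem.Int.mod (a + (i:Int)) 10 ≠ 9) →
    ((List.range k).flatMap (fun i : Nat => dfsB n f (a + (i : Int)))).head? = some a ∧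
    List.IsChain (fun x y => stepA n x = y)
      ((List.range k).flatMap (fun i : Nat => dfsB n f (a + (i : Int)))) ∧
    ∃ l, ((List.range k).flatMap (fun i : Nat => dfsB n f (a + (i : Int)))).getLast? = some l ∧
      stepA n l = whileA n 64 (a + (k:Int) - 1) + 1 := by
  intro k
  induction k with
  | zero => intro a _ h0 _ _ _; simp at h0
  | succ k ihk =>
    intro a ha _ hle hf hmod
    have ha_n : a ≤ n := by push_cast at hle; omega
    obtain ⟨hh0, hc0, l0, hl0, hs0⟩ := ih a ha ha_n hf
    by_cases hk0 : k = 0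
    · subst hk0
      have e : (List.range 1).flatMap (fun i : Nat => dfsB n f (a + (i:Int))) = dfsB n f a := by simp
      rw [e]
      refine ⟨hh0, hc0, l0, hl0, ?_⟩
      rw [hs0]; norm_num
    · have hsplit : List.range (k+1) = List.range 1 ++ (List.range k).map (fun x => 1 + x) := by
        rw [show k+1 = 1+k from by omega, List.range_add]
      rw [hsplit, List.flatMap_append]
      have hone : (List.range 1).flatMap (fun i : Nat => dfsB n f (a + (i : Int))) = dfsB n f a := by
        simp
      have hcomp : ((List.range k).map (fun x => 1 + x)).flatMap (fun i : Nat => dfsB n f (a + (i : Int)))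
          = (List.range k).flatMap (fun i : Nat => dfsB n f ((a + 1) + (i : Int))) := by
        rw [List.flatMap_map]; apply List.flatMap_congr; intro x _
        show dfsB n f (a + ((1 + x : Nat) : Int)) = dfsB n f ((a + 1) + (x : Int))
        congr 1; push_cast; ring
      rw [hone, hcomp]
      obtain ⟨hh1, hc1, l1, hl1, hs1⟩ := ihk (a+1) (by omega) (by omega)
        (by push_cast at hle ⊢; omega)
        (by nlinarith [pow_pos (show (0:Int) < 10 by norm_num) f])
        (by intro i hik
            have h9 := hmod (i+1) (by omega)
            convert h9 using 2
            push_cast; ring)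
      refine ⟨?_, ?_, ?_⟩
      · rw [List.head?_append, hh0]; rfl
      · rw [List.isChain_append]
        refine ⟨hc0, hc1, ?_⟩
        intro x hx y hy
        rw [hl0] at hx; rw [hh1] at hy
        simp only [Option.mem_some_iff] at hx hy
        subst hx; subst hy
        rw [hs0]
        have hcond : ¬ (PySem.Int.mod a 10 = 9 ∨ a + 1 > n) := by
          intro h; rcases h with h | h
          · exact hmod 0 (by omega) (by simpa using h)
          · push_cast at hle; omega
        rw [show (64:Nat) = 63+1 from rfl, whileA_succ, if_neg hcond]
      · refine ⟨l1, ?_, ?_⟩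
        · rw [List.getLast?_append, hl1]; rfl
        · rw [hs1]; congr 2; push_cast; ring

lemma dfs_chain (n : Int) (hn60 : n < 10 ^ 60) : ∀ (f : Nat) (c : Int), 1 ≤ c → c ≤ n →
    n < c * 10 ^ f →
    (dfsB n f c).head? = some c ∧
    List.IsChain (fun x y => stepA n x = y) (dfsB n f c) ∧
    ∃ l, (dfsB n f c).getLast? = some l ∧ stepA n l = whileA n 64 c + 1 := by
  intro f
  induction f with
  | zero => intro c hc hcn hf; simp only [pow_zero, mul_one] at hf; omega
  | succ f ih =>
    intro c hc hcn hf
    have e : dfsB n (f+1) c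
        = c :: (List.range 10).flatMap (fun d : Nat => dfsB n f (c * 10 + (d:Int))) := by
      rw [show dfsB n (f+1) c = if c > n then [] else
        c :: (List.range 10).flatMap (fun d : Nat => dfsB n f (c * 10 + (d : Int))) from rfl,
        if_neg (by omega)]
    by_cases h10 : c * 10 ≤ n
    · set D : Int := min 9 (n - c * 10) with hD
      have hD0 : 0 ≤ D := by omega
      have hD9 : D ≤ 9 := by omega
      set k : Nat := (D + 1).toNat with hk
      have hkc : (k:Int) = D + 1 := by omega
      have htrim : (List.range 10).flatMap (fun d : Nat => dfsB n f (c * 10 + (d:Int)))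
          = (List.range k).flatMap (fun d : Nat => dfsB n f (c * 10 + (d:Int))) := by
        apply flatMap_range_trim
        · omega
        · intro d hdk hd10
          apply dfsB_nil
          have h1 : (k:Int) ≤ (d:Int) := by exact_mod_cast hdk
          have h2 : (d:Int) ≤ 9 := by exact_mod_cast Nat.le_of_lt_succ hd10
          omega
      have hrc := run_chain n f ih k (c * 10) (by linarith) (by omega) (by omega)
        (by
          have h9 : c * 10 ^ (f+1) = c * 10 * 10 ^ f := by ring
          linarith)
        (by
          intro i hik
          have h1 : (i:Int) + 1 < (k:Int) := by exact_mod_cast hik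
          have h2 : (0:Int) ≤ (i:Int) := Int.natCast_nonneg i
          rw [PySem.Int.mod_eq_emod_of_pos (by norm_num)]
          omega)
      obtain ⟨hh, hcq, l, hl, hs⟩ := hrc
      rw [e, htrim]
      refine ⟨rfl, ?_, ?_⟩
      · rw [List.isChain_cons]
        refine ⟨?_, hcq⟩
        intro y hy
        rw [hh] at hy
        simp only [Option.mem_some_iff] at hy
        subst hy
        show stepA n c = c * 10
        simp only [stepA, if_pos h10]
      · refine ⟨l, ?_, ?_⟩
        · rw [List.getLast?_cons, hl]; rfl
        · rw [hs]
          have hm : c * 10 + (k:Int) - 1 = c * 10 + D := by omega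
          rw [hm]
          have hcond : PySem.Int.mod (c*10+D) 10 = 9 ∨ (c*10+D) + 1 > n := by
            rw [PySem.Int.mod_eq_emod_of_pos (by norm_num)]
            by_cases h9 : D = 9
            · left; omega
            · right; omega
          rw [show (64:Nat) = 63+1 from rfl, whileA_succ, if_pos hcond]
          have hfd : PySem.Int.floordiv (c*10+D) 10 = c := by
            rw [PySem.Int.floordiv_eq_ediv_of_pos (by norm_num)]; omega
          rw [hfd]
          have hc63 : c < 10 ^ 63 := by
            have hp : (10:Int) ^ 60 ≤ 10 ^ 63 := pow_le_pow_right₀ (by norm_num) (by omega)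
            linarith
          rw [wStab n 63 c (by omega) (by omega) hc63]
    · have hempty : (List.range 10).flatMap (fun d : Nat => dfsB n f (c * 10 + (d:Int))) = [] := by
        rw [List.flatMap_eq_nil_iff]
        intro d _
        apply dfsB_nil
        have := Int.natCast_nonneg d
        omega
      rw [e, hempty]
      refine ⟨rfl, by simp, c, rfl, ?_⟩
      show stepA n c = whileA n 64 c + 1
      simp only [stepA, if_neg h10]

theorem main_eq (n : Int) (hn31 : n ≤ 2147483648) : lexicalOrder n = lexicalOrder_alt n := by
  have hn60 : n < 10 ^ 60 := by
    calc n ≤ 2147483648 := hn31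
    _ < 10 ^ 60 := by norm_num
  by_cases hn : n ≤ 0
  · have hA : lexicalOrder n = [] := by
      unfold lexicalOrder
      rw [PySem.List.pyRange_one_eq_nil (by omega)]
      rfl
    have hB : lexicalOrder_alt n = [] := by
      unfold lexicalOrder_alt
      rw [List.flatMap_eq_nil_iff]
      intro i hi
      rw [PySem.List.mem_pyRange_one] at hi
      exact dfsB_nil n 64 i (by omega)
    rw [hA, hB]
  · push Not at hn
    have hfuel1 : ∀ (c:Int), 1 ≤ c → n < c * 10 ^ 64 := by
      intro c hc
      have hp : (10:Int) ^ 60 ≤ 10 ^ 64 := pow_le_pow_right₀ (by norm_num) (by omega)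
      nlinarith [pow_pos (show (0:Int) < 10 by norm_num) 64]
    have e1 : lexicalOrder_alt n = (List.range 9).flatMap (fun i : Nat => dfsB n 64 (1 + (i:Int))) := by
      unfold lexicalOrder_alt
      rw [PySem.List.pyRange_one]
      norm_num
      rw [List.flatMap_map]
      rfl
    set k0 : Nat := (min 9 n).toNat with hk0
    have hk0c : (k0:Int) = min 9 n := by omega
    have e2 : (List.range 9).flatMap (fun i : Nat => dfsB n 64 (1 + (i:Int)))
        = (List.range k0).flatMap (fun i : Nat => dfsB n 64 (1 + (i:Int))) := by
      apply flatMap_range_trim _ _ _ (by omega)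
      intro d hdk _
      apply dfsB_nil
      have h1 : (k0:Int) ≤ (d:Int) := by exact_mod_cast hdk
      omega
    obtain ⟨hh, hchain, -⟩ := run_chain n 64 (fun c h1 h2 h3 => dfs_chain n hn60 64 c h1 h2 h3)
      k0 1 le_rfl (by omega) (by omega) (hfuel1 1 le_rfl)
      (by intro i hik
          have h1 : (i:Int) + 1 < (k0:Int) := by exact_mod_cast hik
          rw [PySem.Int.mod_eq_emod_of_pos (by norm_num)]
          have h2 := Int.natCast_nonneg i
          omega)
    have hmemP : ∀ m : Int, (m ∈ (List.range 9).flatMap (fun i : Nat => dfsB n 64 (1 + (i:Int)))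
        ↔ 1 ≤ m ∧ m ≤ n) := by
      intro m
      constructor
      · intro hm
        rw [List.mem_flatMap] at hm
        obtain ⟨i, _, hmi⟩ := hm
        have h1 : (1:Int) ≤ 1 + (i:Int) := by linarith [Int.natCast_nonneg i]
        obtain ⟨j, hj1, hj2, hj3⟩ := (dfs_mem n 64 (1+(i:Int)) h1 (hfuel1 _ h1) m).mp hmi
        have hp : (1:Int) ≤ 10 ^ j := one_le_pow₀ (by norm_num)
        exact ⟨by nlinarith, hj3⟩
      · rintro ⟨hm1, hm2⟩
        obtain ⟨c, j, hc1, hc9, hcl, hcr⟩ := lead_digit m hm1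
        rw [List.mem_flatMap]
        refine ⟨(c-1).toNat, ?_, ?_⟩
        · rw [List.mem_range]; omega
        · have hcast : 1 + (((c-1).toNat) : Int) = c := by omega
          rw [hcast]
          exact (dfs_mem n 64 c hc1 (hfuel1 c hc1) m).mpr ⟨j, hcl, hcr, hm2⟩
    have hnodupP : ((List.range 9).flatMap (fun i : Nat => dfsB n 64 (1 + (i:Int)))).Nodup :=
      run_nodup n 64 (fun c h1 h2 => dfs_nodup n 64 c h1 h2) 9 1 le_rfl (by norm_num)
        (hfuel1 1 le_rfl)
    have hlenP : ((List.range 9).flatMap (fun i : Nat => dfsB n 64 (1 + (i:Int)))).length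
        = n.toNat := by
      have h1 : ((List.range 9).flatMap (fun i : Nat => dfsB n 64 (1 + (i:Int)))).toFinset
          = Finset.Icc 1 n := by
        ext m
        rw [List.mem_toFinset, Finset.mem_Icc]
        exact hmemP m
      calc ((List.range 9).flatMap (fun i : Nat => dfsB n 64 (1 + (i:Int)))).length
          = ((List.range 9).flatMap (fun i : Nat => dfsB n 64 (1 + (i:Int)))).toFinset.card :=
            (List.toFinset_card_of_nodup hnodupP).symm
      _ = (Finset.Icc 1 n).card := by rw [h1]
      _ = (n + 1 - 1).toNat := Int.card_Icc 1 n
      _ = n.toNat := by norm_num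
    have hlenR : (PySem.List.pyRange 0 n 1).length = n.toNat := by
      rw [PySem.List.length_pyRange_one]; norm_num
    have hfold := foldA n (PySem.List.pyRange 0 n 1)
      ((List.range k0).flatMap (fun i : Nat => dfsB n 64 (1 + (i:Int)))) [] 1
      (by rw [← e2, hlenP, hlenR]) hchain (fun _ => hh)
    unfold lexicalOrder
    rw [e1, e2]
    simpa using hfold

-- ===== VERDICT (by name: the statement is the Claim_ definition above) =====
theorem lexicalOrder_spec : Claim_equal_lexicalOrder := by
  intro n hdom
  unfold Spec_lexicalOrder
  have hn31 : n ≤ 2147483648 := by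
    unfold Dom_lexicalOrder pvDomInt at hdom
    exact (of_decide_eq_true hdom).2
  exact main_eq n hn31
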